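-- pv_equiv track=rewrite | github.com/StuartRiffle/new-math | gif-41.py | disable_multiples_of_value
-- ===== SOURCE A (Python) =====
-- def disable_multiples_of_value(value, grid_state, dim_even, N, *args):
--     to_disable = set()
--     if value % 2 == 1:
--         for m in range(value, N+1, value):
--             if m != value and m in grid_state:
--                 if not (dim_even and (m%2==0)):
--                     to_disable.add(m)
--     return to_disable
-- ===== SOURCE B (Python) =====
-- def disable_multiples_of_value(value, grid_state, dim_even, N, *args):
--     # Scan the distinct grid entries and keep the proper multiples of an odd
--     # value up to N, instead of generating each multiple and testing membership.
--     if value % 2 == 0: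
--         return set()
--     return {m for m in sorted(set(grid_state))
--             if m % value == 0 and value < m <= N
--             and not (dim_even and m % 2 == 0)}
-- ===== Notes on version B (the rewrite author's own statement) =====
-- stated objective: alternative
-- what changed: B scans the distinct grid elements once and selects the proper multiples of the odd value up to N by a divisibility-and-bounds test, instead of generating every multiple with range and testing membership in the grid list; Pre_ excludes negative odd value, the natural domain being a positive grid value (there A's range walks downward by the negative step, an artefact of range's step-sign semantics rather than anything the function specifies).
-- outside the precondition, e.g. on disable_multiples_of_value(-3, {6}, False, 10): A returns set(), B returns {6}
import Mathlib
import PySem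

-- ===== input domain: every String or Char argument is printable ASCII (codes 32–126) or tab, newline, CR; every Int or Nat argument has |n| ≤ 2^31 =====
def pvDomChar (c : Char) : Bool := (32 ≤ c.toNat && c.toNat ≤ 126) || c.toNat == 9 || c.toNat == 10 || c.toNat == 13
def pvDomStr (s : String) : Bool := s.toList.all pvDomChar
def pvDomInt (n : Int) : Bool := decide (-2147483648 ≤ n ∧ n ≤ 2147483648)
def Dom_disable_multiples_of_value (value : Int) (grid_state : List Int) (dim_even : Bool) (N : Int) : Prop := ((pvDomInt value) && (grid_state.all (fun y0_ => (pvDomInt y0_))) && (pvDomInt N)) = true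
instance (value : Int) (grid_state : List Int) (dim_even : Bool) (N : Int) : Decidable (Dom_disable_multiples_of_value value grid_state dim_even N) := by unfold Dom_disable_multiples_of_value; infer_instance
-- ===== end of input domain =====

-- B replaces A's generate-multiples-and-test-membership loop by one scan of the distinct
-- grid elements selecting the proper multiples of the odd value up to N (objective:
-- alternative decomposition; not measured faster).

-- ===== PORT A =====
def disable_multiples_of_value (value : Int) (grid_state : List Int) (dim_even : Bool) (N : Int) : List Int :=
  let to_disable : PySem.Set Int := PySem.Set.empty
  if PySem.Int.mod value 2 == 1 then
    (PySem.List.pyRange value (N + 1) value).foldl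
      (fun s m =>
        if m != value && grid_state.contains m then
          if !(dim_even && PySem.Int.mod m 2 == 0) then PySem.Set.add s m else s
        else s)
      to_disable
  else to_disable

-- ===== PORT B =====
def disable_multiples_of_value_alt (value : Int) (grid_state : List Int) (dim_even : Bool) (N : Int) : List Int :=
  if PySem.Int.mod value 2 == 0 then PySem.Set.empty
  else
    PySem.Set.ofList
      ((PySem.List.sorted (PySem.Set.ofList grid_state) (fun x => x) false).filter
        (fun m => PySem.Int.mod m value == 0 && decide (value < m) && decide (m ≤ N) &&
                  !(dim_even && PySem.Int.mod m 2 == 0)))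

-- ===== PRECONDITION & SPEC =====
-- Pre_ excludes negative odd `value` (the function's natural domain is a positive grid value;
-- for a negative odd value A's range(value, N+1, value) steps downward by the negative step,
-- an artefact of range's step-sign semantics, while B's upward scan does the natural thing).
def Pre_disable_multiples_of_value (value : Int) (grid_state : List Int) (dim_even : Bool) (N : Int) : Prop := 0 ≤ value ∨ PySem.Int.mod value 2 = 0
instance (value : Int) (grid_state : List Int) (dim_even : Bool) (N : Int) : Decidable (Pre_disable_multiples_of_value value grid_state dim_even N) := by unfold Pre_disable_multiples_of_value; infer_instance
def pvWitness_disable_multiples_of_value : Int × List Int × Bool × Int := (3, [6, 9, 7], false, 10)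
def Spec_disable_multiples_of_value (value : Int) (grid_state : List Int) (dim_even : Bool) (N : Int) (out : List Int) : Prop := out = disable_multiples_of_value_alt value grid_state dim_even N
instance (value : Int) (grid_state : List Int) (dim_even : Bool) (N : Int) (out : List Int) : Decidable (Spec_disable_multiples_of_value value grid_state dim_even N out) := by unfold Spec_disable_multiples_of_value; infer_instance

-- ===== CLAIM (what is proved, stated in full; the proofs are below) =====
def Claim_equal_disable_multiples_of_value : Prop := ∀ (value : Int) (grid_state : List Int) (dim_even : Bool) (N : Int), Dom_disable_multiples_of_value value grid_state dim_even N → Pre_disable_multiples_of_value value grid_state dim_even N → Spec_disable_multiples_of_value value grid_state dim_even N (disable_multiples_of_value value grid_state dim_even N)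

-- ===== LEMMAS AND PROOFS =====

-- two strictly increasing lists with the same members are equal
theorem pv_eq_of_mem_pairwise_lt {l₁ l₂ : List Int}
    (h₁ : l₁.Pairwise (· < ·)) (h₂ : l₂.Pairwise (· < ·))
    (hm : ∀ x, x ∈ l₁ ↔ x ∈ l₂) : l₁ = l₂ := by
  have n₁ : l₁.Nodup := h₁.imp (fun h => ne_of_lt h)
  have n₂ : l₂.Nodup := h₂.imp (fun h => ne_of_lt h)
  exact PySem.List.eq_of_perm_of_pairwise_le_of_injective (fun x => x)
    (fun a b h => h) ((List.perm_ext_iff_of_nodup n₁ n₂).2 hm)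
    (h₁.imp le_of_lt) (h₂.imp le_of_lt)

theorem pv_pairwise_lt_pyRange_of_pos (a b : Int) {s : Int} (hs : 0 < s) :
    (PySem.List.pyRange a b s).Pairwise (· < ·) := by
  rw [PySem.List.pyRange_of_pos a b hs]
  refine List.Pairwise.map _ (fun i j (hij : i < j) => ?_) List.pairwise_lt_range
  have : (i : Int) < (j : Int) := by exact_mod_cast hij
  have := mul_lt_mul_of_pos_left this hs
  omega

theorem pv_hbody (value : Int) (grid_state : List Int) (dim_even : Bool) :
    (fun (s : List Int) m =>
        if m != value && grid_state.contains m then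
          if !(dim_even && PySem.Int.mod m 2 == 0) then PySem.Set.add s m else s
        else s)
      = (fun s m => if ((m != value && grid_state.contains m) &&
            !(dim_even && PySem.Int.mod m 2 == 0)) then PySem.Set.add s m else s) := by
  funext s m
  cases h1 : (m != value && grid_state.contains m) <;>
    cases h2 : (!(dim_even && PySem.Int.mod m 2 == 0)) <;> simp

theorem pv_dvd_shift (value : Int) (x : Int) : value ∣ x - value ↔ value ∣ x := by
  constructor
  · intro h; simpa using dvd_add h (dvd_refl value)
  · intro h; exact dvd_sub h (dvd_refl value)

-- ===== VERDICT (by name: the statement is the Claim_ definition above) =====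
theorem disable_multiples_of_value_spec : Claim_equal_disable_multiples_of_value := by
  intro value grid_state dim_even N _ hpre
  unfold Spec_disable_multiples_of_value disable_multiples_of_value disable_multiples_of_value_alt
  by_cases hodd : PySem.Int.mod value 2 = 1
  · -- value is odd and nonnegative, hence positive
    have hv0 : value ≠ 0 := by
      intro h; rw [h] at hodd; simp [PySem.Int.mod] at hodd
    have hpos : 0 < value := by
      rcases hpre with h | h
      · exact lt_of_le_of_ne h (Ne.symm hv0)
      · rw [h] at hodd; exact absurd hodd (by norm_num)
    have e1 : (PySem.Int.mod value 2 == 1) = true := by rw [hodd]; rfl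
    have e2 : (PySem.Int.mod value 2 == 0) = false := by rw [hodd]; rfl
    rw [e1, e2, if_pos rfl, if_neg Bool.false_ne_true]
    rw [pv_hbody, PySem.List.foldl_if_eq_foldl_filter]
    show PySem.Set.ofList _ = _
    have hRp : (PySem.List.pyRange value (N + 1) value).Pairwise (· < ·) :=
      pv_pairwise_lt_pyRange_of_pos value (N + 1) hpos
    have hys : (PySem.List.sorted (PySem.Set.ofList grid_state) (fun x => x) false).Pairwise (· < ·) :=
      PySem.List.sorted_ofList_pairwise_lt grid_state
    rw [PySem.Set.ofList_eq_self_of_nodup _ (List.Nodup.sublist (List.filter_sublist) (hRp.imp ne_of_lt)),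
        PySem.Set.ofList_eq_self_of_nodup _ (List.Nodup.sublist (List.filter_sublist) (hys.imp ne_of_lt))]
    refine pv_eq_of_mem_pairwise_lt (List.Pairwise.sublist (List.filter_sublist) hRp)
      (List.Pairwise.sublist (List.filter_sublist) hys) (fun x => ?_)
    simp only [List.mem_filter, PySem.List.mem_sorted, PySem.Set.mem_ofList,
      PySem.List.mem_pyRange_iff_of_pos hpos, pv_dvd_shift, Bool.and_eq_true, bne_iff_ne,
      ne_eq, beq_iff_eq, decide_eq_true_eq, List.contains_iff_mem, Int.lt_add_one_iff,
      PySem.Int.mod_eq_zero_iff_dvd]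
    constructor
    · rintro ⟨⟨hle, hN, hdvd⟩, ⟨hne, hmem⟩, hpar⟩
      exact ⟨hmem, ⟨⟨hdvd, lt_of_le_of_ne hle (Ne.symm hne)⟩, hN⟩, hpar⟩
    · rintro ⟨hmem, ⟨⟨hdvd, hlt⟩, hN⟩, hpar⟩
      exact ⟨⟨le_of_lt hlt, hN, hdvd⟩, ⟨ne_of_gt hlt, hmem⟩, hpar⟩
  · have h01 : PySem.Int.mod value 2 = 0 ∨ PySem.Int.mod value 2 = 1 := by
      have h1 := PySem.Int.mod_nonneg value (b := 2) (by norm_num)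
      have h2 := PySem.Int.mod_lt value (b := 2) (by norm_num)
      omega
    have h0 : PySem.Int.mod value 2 = 0 := h01.resolve_right hodd
    have gA : (PySem.Int.mod value 2 == 1) = false := by rw [h0]; rfl
    have gB : (PySem.Int.mod value 2 == 0) = true := by rw [h0]; rfl
    rw [gA, gB, if_neg Bool.false_ne_true, if_pos rfl]
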